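-- pv_equiv track=rewrite | github.com/BabelFish0/advent-of-code-24 | solutions/day9-2.py | pop_empty
-- ===== SOURCE A (Python) =====
-- def pop_empty(storage):
--     remove_ids = []
--     for idx, element in enumerate(storage):
--         if len(element) == 0:
--             remove_ids += [idx]
--     for idx in remove_ids[::-1]:
--         storage.pop(idx)
--     return storage
-- ===== SOURCE B (Python) =====
-- def pop_empty(storage):
--     j = 0
--     for i in range(len(storage)):
--         if len(storage[i]) != 0:
--             storage[j] = storage[i]
--             j += 1
--     del storage[j:]
--     return storage
-- ===== Notes on version B (the rewrite author's own statement) =====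
-- stated objective: alternative
-- what changed: Replaces A's two-pass collect-empty-indices-then-pop-each-in-reverse with a single forward two-pointer in-place compaction pass followed by one tail truncation.
import Mathlib
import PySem

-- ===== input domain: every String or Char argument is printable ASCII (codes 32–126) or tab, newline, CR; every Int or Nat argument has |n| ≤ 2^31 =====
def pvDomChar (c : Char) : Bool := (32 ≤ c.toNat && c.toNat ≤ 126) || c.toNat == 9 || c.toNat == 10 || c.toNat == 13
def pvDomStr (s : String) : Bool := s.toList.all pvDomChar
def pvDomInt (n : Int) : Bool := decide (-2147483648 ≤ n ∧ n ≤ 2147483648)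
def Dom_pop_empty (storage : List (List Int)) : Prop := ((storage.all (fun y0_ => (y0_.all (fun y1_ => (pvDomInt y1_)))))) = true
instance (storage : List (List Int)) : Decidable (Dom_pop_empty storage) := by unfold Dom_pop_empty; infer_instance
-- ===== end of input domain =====

-- B replaces A's collect-indices-then-pop-in-reverse with a single forward two-pointer
-- compaction pass (both mutate the caller's list in place; equivalence proved on the return value).

-- ===== PORT A =====
-- storage.pop(idx); the index is always in range here, so the none branch is unreachable
def popAt (st : List (List Int)) (idx : Int) : List (List Int) :=
  match PySem.List.pop? st idx with
  | some r => r.2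
  | none => st

def pop_empty (storage : List (List Int)) : List (List Int) :=
  let remove_ids : List Int :=
    (PySem.List.enumerate storage).foldl
      (fun acc p => if p.2.length = 0 then acc ++ [p.1] else acc) []
  -- remove_ids[::-1]; step -1 with no bounds never yields none
  let rev := (PySem.List.slice? remove_ids none none (-1)).getD []
  rev.foldl (fun st idx => popAt st idx) storage

-- ===== PORT B =====
-- the Python list is an array: the loop state is (buf, j) with buf an Array;
-- the indices i and j of storage[i] / storage[j] = ... are nonnegative and in range
-- on every iteration, so getD ∘ toNat and setIfInBounds ∘ toNat are exact here
def pop_empty_alt (storage : List (List Int)) : List (List Int) :=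
  let n : Int := storage.length
  let st := (PySem.List.pyRange 0 n 1).foldl
    (fun (st : Array (List Int) × Int) i =>
      if (st.1.getD i.toNat []).length ≠ 0 then
        (st.1.setIfInBounds st.2.toNat (st.1.getD i.toNat []), st.2 + 1)
      else st) (storage.toArray, 0)
  -- del storage[j:] keeps storage[:j]
  PySem.List.slice st.1.toList none (some st.2)

-- ===== PRECONDITION & SPEC =====
def Spec_pop_empty (storage : List (List Int)) (out : List (List Int)) : Prop := out = pop_empty_alt storage
instance (storage : List (List Int)) (out : List (List Int)) : Decidable (Spec_pop_empty storage out) := by unfold Spec_pop_empty; infer_instance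

-- ===== CLAIM (what is proved, stated in full; the proofs are below) =====
def Claim_equal_pop_empty : Prop := ∀ (storage : List (List Int)), Dom_pop_empty storage → Spec_pop_empty storage (pop_empty storage)

-- ===== LEMMAS AND PROOFS =====

def PNE : List Int → Bool := fun l => decide (l.length ≠ 0)

def idsFrom (s : List (List Int)) (k : Int) : List Int :=
  ((PySem.List.enumerate s k).filter (fun p => decide (p.2.length = 0))).map (·.1)

theorem popAt_append (L R : List (List Int)) (x : List Int) :
    popAt (L ++ x :: R) (L.length : Int) = L ++ R := by
  unfold popAt
  rw [PySem.List.pop?_natCast _ _ (by simp : L.length < (L ++ x :: R).length)]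
  rw [List.eraseIdx_append_of_length_le (le_refl L.length)]
  simp

theorem popA_aux (s pref : List (List Int)) :
    (idsFrom s (pref.length : Int)).foldr (fun idx st => popAt st idx) (pref ++ s)
      = pref ++ s.filter PNE := by
  induction s generalizing pref with
  | nil => simp [idsFrom, PySem.List.enumerate_nil]
  | cons a t ih =>
    have hcast : ((pref.length : Int) + 1) = (((pref ++ [a]).length : Nat) : Int) := by simp
    have hinner : (idsFrom t ((pref.length : Int) + 1)).foldr (fun idx st => popAt st idx)
        (pref ++ a :: t) = (pref ++ [a]) ++ t.filter PNE := by
      rw [hcast, show pref ++ a :: t = (pref ++ [a]) ++ t by simp]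
      exact ih (pref ++ [a])
    by_cases h : a.length = 0
    · obtain rfl : a = [] := by
        cases a with | nil => rfl | cons b bs => simp at h
      have hids : idsFrom (([] : List Int) :: t) (pref.length : Int)
          = (pref.length : Int) :: idsFrom t ((pref.length : Int) + 1) := by
        unfold idsFrom
        rw [PySem.List.enumerate_cons]
        simp
      rw [hids, List.foldr_cons, hinner,
        show (pref ++ [([] : List Int)]) ++ t.filter PNE
            = pref ++ ([] : List Int) :: t.filter PNE by simp,
        popAt_append, List.filter_cons]
      simp [PNE]
    · have hids : idsFrom (a :: t) (pref.length : Int) = idsFrom t ((pref.length : Int) + 1) := by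
        unfold idsFrom
        rw [PySem.List.enumerate_cons]
        have h' : ¬ (a = []) := by
          intro hnil
          subst hnil
          simp at h
        simp [h']
      have ha : PNE a = true := by simp [PNE, h]
      rw [hids, hinner, List.filter_cons, ha]
      simp

theorem pop_empty_eq_filter' (storage : List (List Int)) :
    pop_empty storage = storage.filter PNE := by
  simp only [pop_empty]
  rw [PySem.List.foldl_append_ite (fun p : Int × List Int => p.2.length = 0) (·.1)]
  rw [PySem.List.slice?_none_none_neg_one]
  simp only [Option.getD_some, List.nil_append, List.foldl_reverse]
  have := popA_aux storage []
  simpa [idsFrom] using this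

theorem arr_eq_of_toList_eq (a b : Array (List Int)) (h : a.toList = b.toList) : a = b := by
  cases a
  cases b
  simpa using h

theorem popB_aux (s : List (List Int)) (i : Nat) (hi : i ≤ s.length) :
    ((List.range i).map (fun k : Nat => ((0:Int) + (k:Int)))).foldl
      (fun (st : Array (List Int) × Int) i =>
        if (st.1.getD i.toNat []).length ≠ 0 then
          (st.1.setIfInBounds st.2.toNat (st.1.getD i.toNat []), st.2 + 1)
        else st) (s.toArray, 0)
      = (((s.take i).filter PNE ++ s.drop ((s.take i).filter PNE).length).toArray,
          ((((s.take i).filter PNE).length : Nat) : Int)) := by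
  induction i with
  | zero => simp
  | succ i ih =>
    have hi' : i < s.length := hi
    set F := (s.take i).filter PNE with hF
    set c := F.length with hc
    have hcle : c ≤ i := le_trans (List.length_filter_le _ _) (by rw [List.length_take]; omega)
    have hclen : c < s.length := lt_of_le_of_lt hcle hi'
    have hdrop : s.drop c = s[c] :: s.drop (c + 1) := List.drop_eq_getElem_cons hclen
    have hbufget : (F ++ s.drop c)[i]'(by simp [← hc, List.length_drop]; omega) = s[i] := by
      rw [List.getElem_append_right (by omega)]
      rw [List.getElem_drop]
      congr 1
      omega
    have htake : s.take (i + 1) = s.take i ++ [s[i]] := List.take_succ_eq_append_getElem hi'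
    rw [List.range_succ, List.map_append, List.foldl_append, ih (le_of_lt hi')]
    simp only [List.map_cons, List.map_nil, List.foldl_cons, List.foldl_nil]
    have hget : ((F ++ s.drop c).toArray).getD ((0:Int) + (i:Int)).toNat [] = s[i] := by
      rw [show (((0:Int) + (i:Int)).toNat) = i by omega]
      rw [Array.getD_eq_getD_getElem?, List.getElem?_toArray,
        List.getElem?_eq_getElem (by simp [← hc, List.length_drop]; omega)]
      simp [hbufget]
    by_cases h : s[i].length = 0
    · have hne : ¬ (((F ++ s.drop c).toArray).getD ((0:Int) + (i:Int)).toNat []).length ≠ 0 := by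
        rw [hget]; omega
      have hfilt : (s.take (i+1)).filter PNE = F := by
        rw [htake, List.filter_append, hF]
        simp [PNE, h]
      rw [if_neg hne, hfilt]
    · have hne : (((F ++ s.drop c).toArray).getD ((0:Int) + (i:Int)).toNat []).length ≠ 0 := by
        rw [hget]; omega
      have hfilt : (s.take (i+1)).filter PNE = F ++ [s[i]] := by
        rw [htake, List.filter_append, hF]
        simp [PNE, h]
      have hsetlist : (F ++ s.drop c).set c s[i] = (F ++ [s[i]]) ++ s.drop (c + 1) := by
        rw [hdrop]
        rw [List.set_append_right _ _ (by omega : F.length ≤ c)]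
        rw [show c - F.length = 0 by omega]
        simp only [List.set_cons_zero, List.append_assoc, List.singleton_append]
      have hsetarr : ((F ++ s.drop c).toArray).setIfInBounds ((c : Nat) : Int).toNat s[i]
          = ((F ++ [s[i]]) ++ s.drop (c + 1)).toArray := by
        apply arr_eq_of_toList_eq
        rw [Array.toList_setIfInBounds]
        simp only [Int.toNat_natCast]
        simp [hsetlist]
      rw [if_pos hne, hget, hfilt, hsetarr]
      simp [← hc]

theorem take_len_append {α : Type} (L R : List α) : (L ++ R).take L.length = L := by
  induction L with
  | nil => simp
  | cons a L ih => simp [ih]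

theorem pop_empty_alt_eq_filter' (storage : List (List Int)) :
    pop_empty_alt storage = storage.filter PNE := by
  simp only [pop_empty_alt]
  rw [PySem.List.pyRange_one]
  rw [show (((storage.length : Int)) - 0).toNat = storage.length by simp]
  rw [popB_aux storage storage.length (le_refl _)]
  dsimp only
  rw [PySem.List.slice_to_natCast, take_len_append, List.take_length]

-- ===== VERDICT (by name: the statement is the Claim_ definition above) =====
theorem pop_empty_spec : Claim_equal_pop_empty := by
  intro storage _
  unfold Spec_pop_empty
  rw [pop_empty_eq_filter', pop_empty_alt_eq_filter']
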